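-- pv_equiv track=rewrite | github.com/joshanashakya/dissertation | workspace/dataset/java-python/GeeksForGeeks/4577/A/2.py | xorLessK
-- ===== SOURCE A (Python) =====
-- def xorLessK(arr, n, k):
--     count = 0
--
--     # check all subarrays
--     for i in range(n):
--         tempXor = 0
--         for j in range(i, n):
--             tempXor ^= arr[j]
--             if (tempXor < k):
--                 count += 1
--
--     return count
-- ===== SOURCE B (Python) =====
-- def xorLessK(arr, n, k):
--     # prefix-XOR reformulation: xor of arr[i..j] equals pref[i] ^ pref[j+1],
--     # so count pairs of prefix xors instead of re-accumulating per start index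
--     pref = [0]
--     x = 0
--     for i in range(n):
--         x ^= arr[i]
--         pref.append(x)
--     count = 0
--     for j in range(1, len(pref)):
--         for i in range(j):
--             if pref[i] ^ pref[j] < k:
--                 count += 1
--     return count
-- ===== Notes on version B (the rewrite author's own statement) =====
-- stated objective: alternative
-- what changed: B replaces A's per-start re-accumulation of subarray XORs with a prefix-XOR array built once, then counts index pairs (i,j) with pref[i]^pref[j] < k, grouped by end index instead of start index.
import Mathlib
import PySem

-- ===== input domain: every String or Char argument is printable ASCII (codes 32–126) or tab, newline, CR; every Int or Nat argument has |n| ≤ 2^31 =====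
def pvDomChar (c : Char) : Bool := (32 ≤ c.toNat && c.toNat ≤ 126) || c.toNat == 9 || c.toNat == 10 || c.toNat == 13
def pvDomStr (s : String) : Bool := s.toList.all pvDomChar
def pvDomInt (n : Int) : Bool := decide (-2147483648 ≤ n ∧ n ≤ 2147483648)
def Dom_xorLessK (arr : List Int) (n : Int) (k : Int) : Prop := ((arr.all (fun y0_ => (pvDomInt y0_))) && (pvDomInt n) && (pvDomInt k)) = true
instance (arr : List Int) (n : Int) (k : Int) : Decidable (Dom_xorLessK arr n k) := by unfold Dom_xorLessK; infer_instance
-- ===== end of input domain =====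

-- B replaces A's per-start re-accumulation of subarray XORs by a prefix-XOR array built
-- once, counting pairs (i,j) with pref[i]^pref[j] < k grouped by END index (objective:
-- alternative decomposition, same asymptotic cost).

-- ===== PORT A =====
def xorLessK (arr : List Int) (n : Int) (k : Int) : Int :=
  (PySem.List.pyRange 0 n).foldl
    (fun count i =>
      ((PySem.List.pyRange i n).foldl
        (fun (st : Int × Int) j =>
          (PySem.Int.bxor st.1 (PySem.List.pyGetD arr j 0),
           if PySem.Int.bxor st.1 (PySem.List.pyGetD arr j 0) < k then st.2 + 1 else st.2))
        (0, count)).2)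
    0

-- ===== PORT B =====
def xorLessK_alt (arr : List Int) (n : Int) (k : Int) : Int :=
  let pref := ((PySem.List.pyRange 0 n).foldl
      (fun (st : Int × List Int) i =>
        (PySem.Int.bxor st.1 (PySem.List.pyGetD arr i 0),
         st.2 ++ [PySem.Int.bxor st.1 (PySem.List.pyGetD arr i 0)]))
      (0, [0])).2
  (PySem.List.pyRange 1 (pref.length : Int)).foldl
    (fun count j =>
      (PySem.List.pyRange 0 j).foldl
        (fun c i =>
          if PySem.Int.bxor (PySem.List.pyGetD pref i 0) (PySem.List.pyGetD pref j 0) < k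
          then c + 1 else c)
        count)
    0

-- ===== PRECONDITION & SPEC =====
-- Pre_ excludes exactly the inputs where Python A raises IndexError: n > len(arr)
-- (A reads arr[j] for j up to n-1).  Both Pythons raise there.
def Pre_xorLessK (arr : List Int) (n : Int) (k : Int) : Prop := n ≤ (arr.length : Int)
instance (arr : List Int) (n : Int) (k : Int) : Decidable (Pre_xorLessK arr n k) := by
  unfold Pre_xorLessK; infer_instance

def pvWitness_xorLessK : List Int × Int × Int := ([4, 1, 3, 2], 4, 5)

def Spec_xorLessK (arr : List Int) (n : Int) (k : Int) (out : Int) : Prop := out = xorLessK_alt arr n k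
instance (arr : List Int) (n : Int) (k : Int) (out : Int) : Decidable (Spec_xorLessK arr n k out) := by unfold Spec_xorLessK; infer_instance

-- ===== CLAIM (what is proved, stated in full; the proofs are below) =====
def Claim_equal_xorLessK : Prop := ∀ (arr : List Int) (n : Int) (k : Int), Dom_xorLessK arr n k → Pre_xorLessK arr n k → Spec_xorLessK arr n k (xorLessK arr n k)

-- ===== LEMMAS AND PROOFS =====

-- every Int is (cond s (-(m+1)) m) for a sign bit s and magnitude m
theorem pvIntCode (a : Int) : ∃ (s : Bool) (m : Nat), a = cond s (-(m : Int) - 1) (m : Int) := by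
  by_cases h : 0 ≤ a
  · exact ⟨false, a.toNat, by simp; omega⟩
  · exact ⟨true, (-a - 1).toNat, by simp; omega⟩

theorem pvBxorCode (s t : Bool) (m n : Nat) :
    PySem.Int.bxor (cond s (-(m : Int) - 1) (m : Int)) (cond t (-(n : Int) - 1) (n : Int))
      = cond (s ^^ t) (-((m ^^^ n : Nat) : Int) - 1) ((m ^^^ n : Nat) : Int) := by
  cases s <;> cases t
  · simp only [cond_false, Bool.false_xor, PySem.Int.bxor]
    rw [if_pos (Int.natCast_nonneg m), if_pos (Int.natCast_nonneg n)]
    simp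
  · simp only [cond_false, cond_true, Bool.false_xor, PySem.Int.bxor]
    rw [if_pos (Int.natCast_nonneg m), if_neg (by omega : ¬ (0:Int) ≤ -(n:Int) - 1)]
    have h1 : (-(-(n:Int) - 1) - 1).toNat = n := by omega
    have h2 : ((m : Int)).toNat = m := by omega
    rw [h1, h2]
  · simp only [cond_false, cond_true, Bool.true_xor, Bool.not_false, PySem.Int.bxor]
    rw [if_neg (by omega : ¬ (0:Int) ≤ -(m:Int) - 1), if_pos (Int.natCast_nonneg n)]
    have h1 : (-(-(m:Int) - 1) - 1).toNat = m := by omega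
    have h2 : ((n : Int)).toNat = n := by omega
    rw [h1, h2]
  · simp only [cond_true, Bool.true_xor, Bool.not_true, cond_false, PySem.Int.bxor]
    rw [if_neg (by omega : ¬ (0:Int) ≤ -(m:Int) - 1), if_neg (by omega : ¬ (0:Int) ≤ -(n:Int) - 1)]
    have h1 : (-(-(m:Int) - 1) - 1).toNat = m := by omega
    have h2 : (-(-(n:Int) - 1) - 1).toNat = n := by omega
    rw [h1, h2]

theorem pvBxor_assoc (a b c : Int) :
    PySem.Int.bxor (PySem.Int.bxor a b) c = PySem.Int.bxor a (PySem.Int.bxor b c) := by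
  obtain ⟨s, m, rfl⟩ := pvIntCode a
  obtain ⟨t, n, rfl⟩ := pvIntCode b
  obtain ⟨u, p, rfl⟩ := pvIntCode c
  rw [pvBxorCode, pvBxorCode, pvBxorCode, pvBxorCode, Bool.xor_assoc, Nat.xor_assoc]

-- prefix XOR of the first j elements
def pvP (arr : List Int) (j : Nat) : Int := (arr.take j).foldl PySem.Int.bxor 0

-- pair indicator: 1 iff i < j and pref[i]^pref[j] < k
def pvF (arr : List Int) (k : Int) (i j : Nat) : Int :=
  if i < j ∧ PySem.Int.bxor (pvP arr i) (pvP arr j) < k then 1 else 0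

theorem pvP_succ (arr : List Int) (j : Nat) (h : j < arr.length) :
    pvP arr (j + 1) = PySem.Int.bxor (pvP arr j) arr[j] := by
  have h2 : arr.take (j + 1) = arr.take j ++ [arr[j]] := by
    rw [List.take_add_one, List.getElem?_eq_getElem h]
    rfl
  unfold pvP
  rw [h2, List.foldl_append]
  rfl

theorem pvA_inner (arr : List Int) (k : Int) (i : Nat) (c : Int) :
    ∀ (b : Nat), i ≤ b → b ≤ arr.length →
    (PySem.List.pyRange (i : Int) (b : Int)).foldl
      (fun (st : Int × Int) j =>
        (PySem.Int.bxor st.1 (PySem.List.pyGetD arr j 0),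
         if PySem.Int.bxor st.1 (PySem.List.pyGetD arr j 0) < k then st.2 + 1 else st.2))
      (0, c)
    = (PySem.Int.bxor (pvP arr i) (pvP arr b),
       c + ∑ j ∈ Finset.range b, pvF arr k i (j + 1)) := by
  intro b hib
  induction b, hib using Nat.le_induction with
  | base =>
      intro _
      rw [PySem.List.pyRange_one_eq_nil (le_refl _)]
      simp only [List.foldl_nil, PySem.Int.bxor_self]
      refine Prod.ext rfl ?_
      simp only
      rw [Finset.sum_eq_zero, add_zero]
      intro j hj
      simp only [Finset.mem_range] at hj
      unfold pvF
      rw [if_neg (by omega)]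
  | succ b hib ih =>
      intro hb
      have hblt : b < arr.length := by omega
      have hcast : ((b + 1 : Nat) : Int) = (b : Int) + 1 := by push_cast; ring
      rw [hcast, PySem.List.pyRange_one_succ_right (by exact_mod_cast hib), List.foldl_append,
        ih (by omega), List.foldl_cons, List.foldl_nil]
      have hget : PySem.List.pyGetD arr (b : Int) 0 = arr[b] := by
        rw [PySem.List.pyGetD_natCast, List.getD_eq_getElem arr 0 hblt]
      simp only [hget]
      rw [pvBxor_assoc, ← pvP_succ arr b hblt]
      refine Prod.ext rfl ?_
      simp only
      rw [Finset.sum_range_succ]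
      have hf : pvF arr k i (b + 1)
          = if PySem.Int.bxor (pvP arr i) (pvP arr (b + 1)) < k then 1 else 0 := by
        unfold pvF
        rw [if_congr (and_iff_right (by omega)) rfl rfl]
      rw [hf]
      split_ifs <;> ring

theorem pvA_outer (arr : List Int) (k : Int) (m : Nat) (hm : m ≤ arr.length) (c : Int) :
    ∀ (b : Nat), b ≤ m →
    (PySem.List.pyRange 0 (b : Int)).foldl
      (fun count i =>
        ((PySem.List.pyRange i (m : Int)).foldl
          (fun (st : Int × Int) j =>
            (PySem.Int.bxor st.1 (PySem.List.pyGetD arr j 0),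
             if PySem.Int.bxor st.1 (PySem.List.pyGetD arr j 0) < k then st.2 + 1 else st.2))
          (0, count)).2)
      c
    = c + ∑ i ∈ Finset.range b, ∑ j ∈ Finset.range m, pvF arr k i (j + 1) := by
  intro b
  induction b with
  | zero => intro _; simp [PySem.List.pyRange_one_eq_nil]
  | succ b ih =>
      intro hb
      have hcast : ((b + 1 : Nat) : Int) = (b : Int) + 1 := by push_cast; ring
      rw [hcast, PySem.List.pyRange_one_succ_right (by exact_mod_cast Nat.zero_le b),
        List.foldl_append, ih (by omega), List.foldl_cons, List.foldl_nil]
      rw [pvA_inner arr k b _ m (by omega) hm]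
      rw [Finset.sum_range_succ]
      ring

theorem pvB_build (arr : List Int) :
    ∀ (b : Nat), b ≤ arr.length →
    (PySem.List.pyRange 0 (b : Int)).foldl
      (fun (st : Int × List Int) i =>
        (PySem.Int.bxor st.1 (PySem.List.pyGetD arr i 0),
         st.2 ++ [PySem.Int.bxor st.1 (PySem.List.pyGetD arr i 0)]))
      (0, [0])
    = (pvP arr b, (List.range (b + 1)).map (pvP arr)) := by
  intro b
  induction b with
  | zero =>
      intro _
      rw [PySem.List.pyRange_one_eq_nil (by omega)]
      simp [pvP]
  | succ b ih =>
      intro hb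
      have hblt : b < arr.length := by omega
      have hcast : ((b + 1 : Nat) : Int) = (b : Int) + 1 := by push_cast; ring
      rw [hcast, PySem.List.pyRange_one_succ_right (by exact_mod_cast Nat.zero_le b),
        List.foldl_append, ih (by omega), List.foldl_cons, List.foldl_nil]
      have hget : PySem.List.pyGetD arr (b : Int) 0 = arr[b] := by
        rw [PySem.List.pyGetD_natCast, List.getD_eq_getElem arr 0 hblt]
      simp only [hget]
      rw [← pvP_succ arr b hblt]
      refine Prod.ext rfl ?_
      simp only
      simp [List.range_succ]

theorem pvFold_count (q : Int → Prop) [DecidablePred q] (c : Int) :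
    ∀ (b : Nat),
    (PySem.List.pyRange 0 (b : Int)).foldl
      (fun c i => if q i then c + 1 else c) c
    = c + ∑ i ∈ Finset.range b, (if q (i : Int) then (1 : Int) else 0) := by
  intro b
  induction b with
  | zero => simp [PySem.List.pyRange_one_eq_nil]
  | succ b ih =>
      have hcast : ((b + 1 : Nat) : Int) = (b : Int) + 1 := by push_cast; ring
      rw [hcast, PySem.List.pyRange_one_succ_right (by exact_mod_cast Nat.zero_le b),
        List.foldl_append, ih, List.foldl_cons, List.foldl_nil, Finset.sum_range_succ]
      split_ifs <;> ring

theorem pvPref_get (arr : List Int) (m : Nat) (i : Nat) (hi : i ≤ m) :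
    PySem.List.pyGetD ((List.range (m + 1)).map (pvP arr)) (i : Int) 0 = pvP arr i := by
  rw [PySem.List.pyGetD_natCast,
    List.getD_eq_getElem _ 0 (by simp; omega)]
  simp

theorem pvB_outer (arr : List Int) (k : Int) (m : Nat) :
    ∀ (b : Nat), b ≤ m → ∀ (c : Int),
    (PySem.List.pyRange 1 ((b + 1 : Nat) : Int)).foldl
      (fun count j =>
        (PySem.List.pyRange 0 j).foldl
          (fun c i =>
            if PySem.Int.bxor (PySem.List.pyGetD ((List.range (m + 1)).map (pvP arr)) i 0)
                 (PySem.List.pyGetD ((List.range (m + 1)).map (pvP arr)) j 0) < k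
            then c + 1 else c)
          count)
      c
    = c + ∑ j ∈ Finset.range (b + 1), ∑ i ∈ Finset.range j,
        (if PySem.Int.bxor (pvP arr i) (pvP arr j) < k then (1 : Int) else 0) := by
  intro b
  induction b with
  | zero =>
      intro _ c
      rw [show ((0 + 1 : Nat) : Int) = 1 by norm_num, PySem.List.pyRange_one_eq_nil le_rfl]
      simp
  | succ b ih =>
      intro hb c
      rw [show ((b + 1 + 1 : Nat) : Int) = ((b + 1 : Nat) : Int) + 1 by push_cast; ring,
        PySem.List.pyRange_one_succ_right
          (by exact_mod_cast Nat.succ_le_succ (Nat.zero_le b)),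
        List.foldl_append, ih (by omega) c, List.foldl_cons, List.foldl_nil]
      rw [pvFold_count (fun i =>
        PySem.Int.bxor (PySem.List.pyGetD ((List.range (m + 1)).map (pvP arr)) i 0)
          (PySem.List.pyGetD ((List.range (m + 1)).map (pvP arr)) ((b + 1 : Nat) : Int) 0) < k)
        _ (b + 1)]
      rw [Finset.sum_range_succ (fun j => ∑ i ∈ Finset.range j,
        (if PySem.Int.bxor (pvP arr i) (pvP arr j) < k then (1 : Int) else 0)) (b + 1)]
      have hcong : ∀ i ∈ Finset.range (b + 1),
          (if PySem.Int.bxor (PySem.List.pyGetD ((List.range (m + 1)).map (pvP arr)) (i : Int) 0)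
               (PySem.List.pyGetD ((List.range (m + 1)).map (pvP arr)) ((b + 1 : Nat) : Int) 0) < k
           then (1 : Int) else 0)
          = (if PySem.Int.bxor (pvP arr i) (pvP arr (b + 1)) < k then (1 : Int) else 0) := by
        intro i hi
        simp only [Finset.mem_range] at hi
        rw [pvPref_get arr m i (by omega), pvPref_get arr m (b + 1) (by omega)]
      rw [Finset.sum_congr rfl hcong]
      ring

theorem pvSwap (arr : List Int) (k : Int) (m : Nat) :
    ∑ i ∈ Finset.range m, ∑ j ∈ Finset.range m, pvF arr k i (j + 1)
    = ∑ j ∈ Finset.range (m + 1), ∑ i ∈ Finset.range j,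
        (if PySem.Int.bxor (pvP arr i) (pvP arr j) < k then (1 : Int) else 0) := by
  have h1 : ∀ i, ∑ j ∈ Finset.range m, pvF arr k i (j + 1)
      = ∑ j ∈ Finset.range (m + 1), pvF arr k i j := by
    intro i
    rw [Finset.sum_range_succ']
    have h0 : pvF arr k i 0 = 0 := by unfold pvF; rw [if_neg (by omega)]
    rw [h0, add_zero]
  have h2 : ∀ j, j < m + 1 →
      (∑ i ∈ Finset.range j,
        (if PySem.Int.bxor (pvP arr i) (pvP arr j) < k then (1 : Int) else 0))
      = ∑ i ∈ Finset.range (m + 1), pvF arr k i j := by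
    intro j hj
    have hsub := Finset.sum_subset (f := fun i => pvF arr k i j)
      ((by intro x hx; simp only [Finset.mem_range] at *; omega) :
        Finset.range j ⊆ Finset.range (m + 1))
      (fun i hmem hi => by
        simp only [Finset.mem_range] at hmem hi
        show pvF arr k i j = 0
        unfold pvF
        rw [if_neg (by omega)])
    rw [← hsub]
    apply Finset.sum_congr rfl
    intro i hi
    simp only [Finset.mem_range] at hi
    show (if PySem.Int.bxor (pvP arr i) (pvP arr j) < k then (1 : Int) else 0)
        = (if i < j ∧ PySem.Int.bxor (pvP arr i) (pvP arr j) < k then (1 : Int) else 0)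
    rw [if_congr (and_iff_right hi) rfl rfl]
  calc ∑ i ∈ Finset.range m, ∑ j ∈ Finset.range m, pvF arr k i (j + 1)
      = ∑ i ∈ Finset.range m, ∑ j ∈ Finset.range (m + 1), pvF arr k i j := by
        apply Finset.sum_congr rfl; intro i _; exact h1 i
    _ = ∑ i ∈ Finset.range (m + 1), ∑ j ∈ Finset.range (m + 1), pvF arr k i j := by
        have hrow : (∑ j ∈ Finset.range (m + 1), pvF arr k m j) = 0 :=
          Finset.sum_eq_zero (fun j hj => by
            simp only [Finset.mem_range] at hj
            unfold pvF
            rw [if_neg (by omega)])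
        rw [Finset.sum_range_succ
          (fun i => ∑ j ∈ Finset.range (m + 1), pvF arr k i j) m, hrow, add_zero]
    _ = ∑ j ∈ Finset.range (m + 1), ∑ i ∈ Finset.range (m + 1), pvF arr k i j :=
        Finset.sum_comm
    _ = ∑ j ∈ Finset.range (m + 1), ∑ i ∈ Finset.range j,
          (if PySem.Int.bxor (pvP arr i) (pvP arr j) < k then (1 : Int) else 0) := by
        apply Finset.sum_congr rfl
        intro j hj
        simp only [Finset.mem_range] at hj
        exact (h2 j hj).symm

-- ===== VERDICT (by name: the statement is the Claim_ definition above) =====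
theorem xorLessK_spec : Claim_equal_xorLessK := by
  intro arr n k _ hpre
  unfold Pre_xorLessK at hpre
  unfold Spec_xorLessK xorLessK xorLessK_alt
  by_cases hn : n ≤ 0
  · rw [PySem.List.pyRange_one_eq_nil hn]
    simp only [List.foldl_nil, List.length_cons, List.length_nil]
    rw [PySem.List.pyRange_one_eq_nil (by norm_num)]
    rfl
  · have hmn : ((n.toNat : Nat) : Int) = n := Int.toNat_of_nonneg (by omega)
    have hm : n.toNat ≤ arr.length := by omega
    rw [← hmn]
    rw [pvA_outer arr k n.toNat hm 0 n.toNat (le_refl _)]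
    rw [pvB_build arr n.toNat hm]
    simp only [List.length_map, List.length_range]
    rw [pvB_outer arr k n.toNat n.toNat (le_refl _) 0]
    rw [pvSwap arr k n.toNat]
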